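-- pv_equiv track=rewrite | github.com/NicolasMACZYTA/TPs_2021_2022 | info0603/TP4-5-6/tp2ex2.py | lliste_peltparmin
-- ===== SOURCE A (Python) =====
-- def lliste_peltparmin(p,n):
--     """Donne toutes les listes possibles de p elements parmi n
--     >>> lliste_peltparmin(2,2)
--     [[0, 0], [0, 1], [1, 0], [1, 1]]"""
--     if p==0:
--         rest = [[]]
--     if p>0:
--         rest = []
--         llpnr=lliste_peltparmin(p-1,n)
--         for l in llpnr:
--             for i in range(n):
--                 rest.append(l+[i])
--
--     return rest
-- ===== SOURCE B (Python) =====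
-- def lliste_peltparmin(p, n):
--     """Iterative build: apply the extension step p times to [[]]."""
--     result = [[]]
--     for _ in range(p):
--         result = [l + [i] for l in result for i in range(n)]
--     return result
-- ===== Notes on version B (the rewrite author's own statement) =====
-- stated objective: simpler
-- what changed: Replaced the recursion on p by an iterative loop that applies the one-step extension p times to [[]], building the same lists in the same lexicographic order.
-- outside the precondition, e.g. on lliste_peltparmin(-1, 2): A raises UnboundLocalError, B returns [[]]
import Mathlib
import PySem

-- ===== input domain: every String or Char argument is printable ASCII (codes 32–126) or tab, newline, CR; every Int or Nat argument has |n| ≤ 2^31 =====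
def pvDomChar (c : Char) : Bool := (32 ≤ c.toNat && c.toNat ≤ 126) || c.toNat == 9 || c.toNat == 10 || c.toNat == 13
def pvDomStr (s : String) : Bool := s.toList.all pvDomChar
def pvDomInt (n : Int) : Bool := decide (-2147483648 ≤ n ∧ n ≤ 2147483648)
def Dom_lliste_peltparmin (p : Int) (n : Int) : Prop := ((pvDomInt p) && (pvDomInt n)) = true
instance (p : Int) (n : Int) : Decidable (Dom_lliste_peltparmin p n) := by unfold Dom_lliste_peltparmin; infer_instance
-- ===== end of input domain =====

-- B replaces A's recursion on p by an iterative loop applying the extension step p times (objective: simpler).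

-- ===== PORT A =====
-- A recurses on p; for p < 0 Python raises UnboundLocalError, excluded by Pre_ (the port returns [] there).
def lliste_peltparmin (p : Int) (n : Int) : List (List Int) :=
  if p = 0 then [[]]
  else if 0 < p then
    (lliste_peltparmin (p - 1) n).foldl
      (fun rest l => (PySem.List.pyRange 0 n 1).foldl (fun rest i => rest ++ [l ++ [i]]) rest) []
  else []
termination_by p.toNat
decreasing_by omega

-- ===== PORT B =====
def lliste_peltparmin_alt (p : Int) (n : Int) : List (List Int) :=
  (PySem.List.pyRange 0 p 1).foldl
    (fun result _ => result.flatMap (fun l => (PySem.List.pyRange 0 n 1).map (fun i => l ++ [i])))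
    [[]]

-- ===== PRECONDITION & SPEC =====
-- Pre_ excludes p < 0, on which the Python A raises UnboundLocalError (no branch assigns rest).
def Pre_lliste_peltparmin (p : Int) (n : Int) : Prop := 0 ≤ p
instance (p : Int) (n : Int) : Decidable (Pre_lliste_peltparmin p n) := by unfold Pre_lliste_peltparmin; infer_instance
def pvWitness_lliste_peltparmin : Int × Int := (2, 2)

def Spec_lliste_peltparmin (p : Int) (n : Int) (out : List (List Int)) : Prop := out = lliste_peltparmin_alt p n
instance (p : Int) (n : Int) (out : List (List Int)) : Decidable (Spec_lliste_peltparmin p n out) := by unfold Spec_lliste_peltparmin; infer_instance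

-- ===== CLAIM (what is proved, stated in full; the proofs are below) =====
def Claim_equal_lliste_peltparmin : Prop := ∀ (p : Int) (n : Int), Dom_lliste_peltparmin p n → Pre_lliste_peltparmin p n → Spec_lliste_peltparmin p n (lliste_peltparmin p n)

-- ===== LEMMAS AND PROOFS =====

-- inner loop of A: appending singletons = map
theorem pv_inner (n : Int) (l : List Int) (acc : List (List Int)) :
    (PySem.List.pyRange 0 n 1).foldl (fun rest i => rest ++ [l ++ [i]]) acc
      = acc ++ (PySem.List.pyRange 0 n 1).map (fun i => l ++ [i]) := by
  induction (PySem.List.pyRange 0 n 1) generalizing acc with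
  | nil => simp
  | cons x xs ih => simp [ih]

-- outer loop of A = one step of B
theorem pv_step (n : Int) (xs : List (List Int)) :
    xs.foldl (fun rest l => (PySem.List.pyRange 0 n 1).foldl (fun rest i => rest ++ [l ++ [i]]) rest) []
      = xs.flatMap (fun l => (PySem.List.pyRange 0 n 1).map (fun i => l ++ [i])) := by
  have h : ∀ (acc : List (List Int)),
      xs.foldl (fun rest l => (PySem.List.pyRange 0 n 1).foldl (fun rest i => rest ++ [l ++ [i]]) rest) acc
        = acc ++ xs.flatMap (fun l => (PySem.List.pyRange 0 n 1).map (fun i => l ++ [i])) := by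
    induction xs with
    | nil => simp
    | cons y ys ih =>
      intro acc
      rw [List.foldl_cons, pv_inner, ih, List.flatMap_cons, List.append_assoc]
  simpa using h []

theorem pv_main (k : Nat) (n : Int) :
    lliste_peltparmin (k : Int) n = lliste_peltparmin_alt (k : Int) n := by
  induction k with
  | zero =>
    simp [lliste_peltparmin, lliste_peltparmin_alt, PySem.List.pyRange_zero]
  | succ m ih =>
    rw [lliste_peltparmin]
    have hk : ¬ ((m + 1 : Nat) : Int) = 0 := by omega
    have hp : (0 : Int) < ((m + 1 : Nat) : Int) := by omega
    simp only [hk, if_false, hp, if_true]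
    have hm : ((m + 1 : Nat) : Int) - 1 = (m : Nat) := by omega
    rw [hm, ih, pv_step]
    unfold lliste_peltparmin_alt
    rw [show ((m + 1 : Nat) : Int) = ((m : Nat) : Int) + 1 by omega,
        PySem.List.pyRange_one_succ_right (by omega), List.foldl_append]
    simp

-- ===== VERDICT (by name: the statement is the Claim_ definition above) =====
theorem lliste_peltparmin_spec : Claim_equal_lliste_peltparmin := by
  intro p n _ hp
  unfold Pre_lliste_peltparmin at hp
  unfold Spec_lliste_peltparmin
  obtain ⟨k, rfl⟩ : ∃ k : Nat, p = (k : Int) := ⟨p.toNat, by omega⟩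
  exact pv_main k n
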